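-- pv_equiv track=rewrite | github.com/admirer77/HappyPeopleAI_Assignment | 4_arrays.py | contains_two_elements
-- ===== SOURCE A (Python) =====
-- def contains_two_elements(arr, elem1, elem2):
--     found_elem1 = False
--     found_elem2 = False
--     for num in arr:
--         if num == elem1:
--             found_elem1 = True
--         if num == elem2:
--             found_elem2 = True
--     return found_elem1 and found_elem2
-- ===== SOURCE B (Python) =====
-- def contains_two_elements(arr, elem1, elem2):
--     return all(any(x == e for x in arr) for e in (elem1, elem2))
-- ===== Notes on version B (the rewrite author's own statement) =====
-- stated objective: idiomatic
-- what changed: Replaced the fused two-flag single pass with two independent membership scans (all/any over the two targets) combined conjunctively.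
import Mathlib
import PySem

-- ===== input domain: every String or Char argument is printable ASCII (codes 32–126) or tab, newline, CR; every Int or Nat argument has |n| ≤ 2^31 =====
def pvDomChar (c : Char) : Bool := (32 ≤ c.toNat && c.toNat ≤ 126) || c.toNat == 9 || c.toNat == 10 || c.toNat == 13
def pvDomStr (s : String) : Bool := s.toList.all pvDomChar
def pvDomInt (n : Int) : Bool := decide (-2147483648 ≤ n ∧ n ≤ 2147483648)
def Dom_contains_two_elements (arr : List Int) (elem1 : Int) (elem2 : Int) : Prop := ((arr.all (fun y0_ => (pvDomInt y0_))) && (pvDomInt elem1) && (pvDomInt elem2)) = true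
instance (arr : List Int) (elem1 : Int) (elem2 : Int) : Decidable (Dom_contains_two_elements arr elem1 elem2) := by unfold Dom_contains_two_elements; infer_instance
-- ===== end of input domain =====

-- B replaces A's fused single pass with two flags by two independent membership scans combined with ∧ (idiomatic; same O(n) cost).

-- ===== PORT A =====
-- single pass carrying the two found-flags, exactly A's loop
def contains_two_elements (arr : List Int) (elem1 : Int) (elem2 : Int) : Bool :=
  let st := arr.foldl (fun (st : Bool × Bool) num =>
    (if num == elem1 then true else st.1, if num == elem2 then true else st.2))
    (false, false)
  st.1 && st.2

-- ===== PORT B =====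
-- two independent scans: for each target, does some element equal it?
def contains_two_elements_alt (arr : List Int) (elem1 : Int) (elem2 : Int) : Bool :=
  [elem1, elem2].all (fun e => arr.any (fun x => x == e))

-- ===== PRECONDITION & SPEC =====
def Spec_contains_two_elements (arr : List Int) (elem1 : Int) (elem2 : Int) (out : Bool) : Prop := out = contains_two_elements_alt arr elem1 elem2
instance (arr : List Int) (elem1 : Int) (elem2 : Int) (out : Bool) : Decidable (Spec_contains_two_elements arr elem1 elem2 out) := by unfold Spec_contains_two_elements; infer_instance

-- ===== CLAIM (what is proved, stated in full; the proofs are below) =====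
def Claim_equal_contains_two_elements : Prop := ∀ (arr : List Int) (elem1 : Int) (elem2 : Int), Dom_contains_two_elements arr elem1 elem2 → Spec_contains_two_elements arr elem1 elem2 (contains_two_elements arr elem1 elem2)

-- ===== LEMMAS AND PROOFS =====
-- loop invariant: the fold's state is (s1 ∨ elem1 ∈ arr-scan, s2 ∨ elem2 ∈ arr-scan)
lemma foldl_flags (arr : List Int) (elem1 elem2 : Int) (s : Bool × Bool) :
    arr.foldl (fun (st : Bool × Bool) num =>
      (if num == elem1 then true else st.1, if num == elem2 then true else st.2)) s
    = (s.1 || arr.any (fun x => x == elem1), s.2 || arr.any (fun x => x == elem2)) := by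
  induction arr generalizing s with
  | nil => simp
  | cons h t ih =>
    simp only [List.foldl_cons, List.any_cons, ih]
    by_cases h1 : h = elem1 <;> by_cases h2 : h = elem2 <;>
      simp [h1, h2, beq_eq_decide, Bool.or_comm, Bool.or_assoc]

-- ===== VERDICT (by name: the statement is the Claim_ definition above) =====
theorem contains_two_elements_spec : Claim_equal_contains_two_elements := by
  intro arr elem1 elem2 _
  unfold Spec_contains_two_elements contains_two_elements contains_two_elements_alt
  rw [foldl_flags]
  simp [Bool.and_comm]
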